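-- pv_equiv track=rewrite | github.com/KDT-Hot6/Coogle | aws_django/webproj/homepage/views.py | groupingBoard
-- ===== SOURCE A (Python) =====
-- def groupingBoard(info):
--     res_list = []
--     group = []
--     count = 0
--
--     for v in info.values():
--         if count == 0:
--             group = []
--         group.append(v)
--         count += 1
--         if count == 6:
--             res_list.append(group)
--             count = 0
--
--     return  res_list
-- ===== SOURCE B (Python) =====
-- def groupingBoard(info):
--     vals = list(info.values())
--     return [vals[i:i+6] for i in range(0, len(vals) - len(vals) % 6, 6)]
-- ===== Notes on version B (the rewrite author's own statement) =====
-- stated objective: idiomatic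
-- what changed: Replaces the counter-and-accumulator loop (reset group at 0, flush at 6) with a single slice comprehension over a stride-6 range whose stop bound len(vals) - len(vals) % 6 drops the incomplete trailing group up front.
import Mathlib
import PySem

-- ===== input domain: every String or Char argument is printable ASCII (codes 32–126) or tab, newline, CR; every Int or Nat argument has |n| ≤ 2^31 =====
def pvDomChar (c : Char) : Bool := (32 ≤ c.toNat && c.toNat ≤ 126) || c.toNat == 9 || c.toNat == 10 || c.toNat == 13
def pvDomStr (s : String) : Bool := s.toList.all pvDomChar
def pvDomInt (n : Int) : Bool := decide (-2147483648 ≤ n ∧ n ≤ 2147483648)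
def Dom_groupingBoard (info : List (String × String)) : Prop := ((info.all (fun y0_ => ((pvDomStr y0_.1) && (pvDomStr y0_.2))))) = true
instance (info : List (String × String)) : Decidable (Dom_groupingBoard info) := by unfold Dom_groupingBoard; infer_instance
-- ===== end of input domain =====

-- B replaces A's counter/accumulator loop by one stride-6 slice comprehension whose
-- stop bound len - len % 6 drops the incomplete trailing group up front (objective: idiomatic).

-- ===== PORT A =====
-- loop body of A: reset group when count == 0, append v, flush when count hits 6
def gbStep (st : List (List String) × List String × Int) (v : String) :
    List (List String) × List String × Int :=
  let res := st.1
  let group := if st.2.2 == 0 then ([] : List String) else st.2.1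
  let group := group ++ [v]
  let count := st.2.2 + 1
  if count == 6 then (res ++ [group], group, (0 : Int)) else (res, group, count)

def groupingBoard (info : List (String × String)) : List (List String) :=
  ((PySem.Dict.ofList info).values.foldl gbStep ([], [], 0)).1

-- ===== PORT B =====
def groupingBoard_alt (info : List (String × String)) : List (List String) :=
  let vals := (PySem.Dict.ofList info).values
  let n : Int := PySem.List.len vals
  (PySem.List.pyRange 0 (n - PySem.Int.mod n 6) 6).map
    (fun i => PySem.List.slice vals (some i) (some (i + 6)))

-- ===== PRECONDITION & SPEC =====
def Spec_groupingBoard (info : List (String × String)) (out : List (List String)) : Prop := out = groupingBoard_alt info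
instance (info : List (String × String)) (out : List (List String)) : Decidable (Spec_groupingBoard info out) := by unfold Spec_groupingBoard; infer_instance

-- ===== CLAIM (what is proved, stated in full; the proofs are below) =====
def Claim_equal_groupingBoard : Prop := ∀ (info : List (String × String)), Dom_groupingBoard info → Spec_groupingBoard info (groupingBoard info)

-- ===== LEMMAS AND PROOFS =====

-- common normal form: the list of full 6-chunks of l
def pvChunks (l : List String) : List (List String) :=
  (List.range (l.length / 6)).map (fun k => (l.drop (6 * k)).take 6)

-- A's loop, started with count = 0, appends exactly the full 6-chunks to res
theorem gbLoop_eq (l : List String) (res : List (List String)) (g : List String) :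
    (l.foldl gbStep (res, g, 0)).1 = res ++ pvChunks l := by
  match l with
  | [] => simp [pvChunks]
  | [a] => simp [pvChunks, gbStep]
  | [a, b] => simp [pvChunks, gbStep]
  | [a, b, c] => simp [pvChunks, gbStep]
  | [a, b, c, d] => simp [pvChunks, gbStep]
  | [a, b, c, d, e] => simp [pvChunks, gbStep]
  | a1 :: a2 :: a3 :: a4 :: a5 :: a6 :: rest =>
    have h6 : (a1 :: a2 :: a3 :: a4 :: a5 :: a6 :: rest).foldl gbStep (res, g, 0)
        = rest.foldl gbStep (res ++ [[a1, a2, a3, a4, a5, a6]], [a1, a2, a3, a4, a5, a6], 0) := by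
      simp [gbStep, List.foldl]
    rw [h6, gbLoop_eq rest]
    have hch : pvChunks (a1 :: a2 :: a3 :: a4 :: a5 :: a6 :: rest)
        = [a1, a2, a3, a4, a5, a6] :: pvChunks rest := by
      unfold pvChunks
      have hlen : (a1 :: a2 :: a3 :: a4 :: a5 :: a6 :: rest).length / 6 = rest.length / 6 + 1 := by
        simp; omega
      rw [hlen, List.range_succ_eq_map]
      simp only [List.map_cons, List.map_map, Nat.mul_zero, List.drop_zero]
      refine List.cons_eq_cons.mpr ⟨rfl, ?_⟩
      apply List.map_congr_left
      intro k _
      simp only [Function.comp]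
      rw [show 6 * (k + 1) = 6 + 6 * k by ring, ← List.drop_drop]
      rfl
    rw [hch]; simp
termination_by l.length

-- B's comprehension computes the same full 6-chunks
theorem alt_eq_chunks (l : List String) :
    (PySem.List.pyRange 0 ((PySem.List.len l) - PySem.Int.mod (PySem.List.len l) 6) 6).map
      (fun i => PySem.List.slice l (some i) (some (i + 6))) = pvChunks l := by
  have hq : (PySem.List.len l) - PySem.Int.mod (PySem.List.len l) 6
      = ((6 * (l.length / 6) : Nat) : Int) := by
    rw [PySem.List.len_eq, PySem.Int.mod_eq_emod_of_pos (by norm_num : (0:Int) < 6)]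
    push_cast
    omega
  rw [hq, PySem.List.pyRange_of_pos 0 _ (by norm_num)]
  set q := l.length / 6 with hqdef
  have hcnt : (if (0:Int) < ((6 * q : Nat) : Int) then ((((6 * q : Nat) : Int) - 0 + 6 - 1) / 6).toNat else 0) = q := by
    by_cases h : 0 < q
    · rw [if_pos (by exact_mod_cast Nat.mul_pos (by norm_num) h)]
      have h1 : (((6 * q : Nat) : Int) - 0 + 6 - 1) / 6 = (q : Int) := by
        push_cast; omega
      rw [h1]; exact Int.toNat_natCast q
    · have h0 : q = 0 := by omega
      simp [h0]
  rw [hcnt, List.map_map]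
  unfold pvChunks
  apply List.map_congr_left
  intro k _
  show PySem.List.slice l (some (0 + 6 * (k : Int))) (some (0 + 6 * (k : Int) + 6)) = _
  have h1 : (0 : Int) + 6 * (k : Int) = ((6 * k : Nat) : Int) := by push_cast; ring
  have h2 : (0 : Int) + 6 * (k : Int) + 6 = ((6 * k : Nat) : Int) + ((6 : Nat) : Int) := by push_cast; ring
  rw [h1]
  have h3 : ((6 * k : Nat) : Int) + 6 = ((6 * k : Nat) : Int) + ((6 : Nat) : Int) := by norm_num
  rw [h3]
  exact PySem.List.slice_natCast_add l (6 * k) 6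

-- ===== VERDICT (by name: the statement is the Claim_ definition above) =====
theorem groupingBoard_spec : Claim_equal_groupingBoard := by
  intro info _
  unfold Spec_groupingBoard groupingBoard groupingBoard_alt
  rw [gbLoop_eq, alt_eq_chunks]
  simp
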